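-- pv_equiv track=rewrite | github.com/dylanli073/housingTTC | alg2local.py | multiGraphMaker
-- ===== SOURCE A (Python) =====
-- house_mapping = {"Adams": 1, "Cabot": 2, "Currier": 3, "Dunster": 4, "Eliot": 5, "Kirkland": 6, "Leverett": 7,
--                  "Lowell": 8, "Mather": 9, "Pfoho": 10, "Quincy": 11, "Winthrop": 12}
--
-- num_mapping = {1: "Adams", 2: "Cabot", 3: "Currier", 4: "Dunster", 5: "Eliot", 6: "Kirkland", 7: "Leverett",
--                8: "Lowell", 9: "Mather", 10: "Pfoho", 11: "Quincy", 12: "Winthrop"}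
--
-- def multiGraphMaker(block_size, gl, round):
--     house_graph = [[] for i in range(12)]
--     house_prefs = {"Adams":[0 for i in range(12)], "Cabot": [0 for i in range(12)], "Currier": [0 for i in range(12)],
--                    "Dunster": [0 for i in range(12)], "Eliot": [0 for i in range(12)], "Kirkland":[0 for i in range(12)],
--                    "Leverett": [0 for i in range(12)], "Lowell": [0 for i in range(12)], "Mather": [0 for i in range(12)],
--                    "Pfoho": [0 for i in range(12)], "Quincy": [0 for i in range(12)], "Winthrop": [0 for i in range(12)]}
--     edge_list = []
--     for groupSize, s_house, prefs in gl:
--         if groupSize == block_size: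
--             house_prefs[s_house][prefs[round]-1] += 1
--     for groupSize, s_house, prefs in gl:
--         if groupSize == block_size and (s_house, prefs[round]-1) not in edge_list and num_mapping[prefs[round]] != s_house:
--             edge_list.append((s_house, prefs[round]-1))
--             house_graph[house_mapping[s_house]-1].append((prefs[round]-1, house_prefs[s_house][prefs[round]-1]))
--
--     return house_graph
-- ===== SOURCE B (Python) =====
-- house_mapping = {"Adams": 1, "Cabot": 2, "Currier": 3, "Dunster": 4, "Eliot": 5, "Kirkland": 6, "Leverett": 7,
--                  "Lowell": 8, "Mather": 9, "Pfoho": 10, "Quincy": 11, "Winthrop": 12}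
--
-- num_mapping = {1: "Adams", 2: "Cabot", 3: "Currier", 4: "Dunster", 5: "Eliot", 6: "Kirkland", 7: "Leverett",
--                8: "Lowell", 9: "Mather", 10: "Pfoho", 11: "Quincy", 12: "Winthrop"}
--
-- def multiGraphMaker(block_size, gl, round):
--     # one pass: ordered dict keyed by (house, target) accumulates the totals;
--     # insertion order = first-appearance order of each edge
--     counts = {}
--     for groupSize, s_house, prefs in gl:
--         if groupSize == block_size:
--             key = (s_house, prefs[round] - 1)
--             counts[key] = counts.get(key, 0) + 1
--     house_graph = [[] for _ in range(12)]
--     for (s_house, target), cnt in counts.items():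
--         if num_mapping[target + 1] != s_house:
--             house_graph[house_mapping[s_house] - 1].append((target, cnt))
--     return house_graph
-- ===== Notes on version B (the rewrite author's own statement) =====
-- stated objective: simpler
-- what changed: Replaces A's two passes over gl (a per-house 12-slot count table plus a second pass with a linear edge_list membership scan) by one counting pass into an insertion-ordered dict keyed by (house, target) and a single pass over its items, skipping self-loops at emission time.
import Mathlib
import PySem

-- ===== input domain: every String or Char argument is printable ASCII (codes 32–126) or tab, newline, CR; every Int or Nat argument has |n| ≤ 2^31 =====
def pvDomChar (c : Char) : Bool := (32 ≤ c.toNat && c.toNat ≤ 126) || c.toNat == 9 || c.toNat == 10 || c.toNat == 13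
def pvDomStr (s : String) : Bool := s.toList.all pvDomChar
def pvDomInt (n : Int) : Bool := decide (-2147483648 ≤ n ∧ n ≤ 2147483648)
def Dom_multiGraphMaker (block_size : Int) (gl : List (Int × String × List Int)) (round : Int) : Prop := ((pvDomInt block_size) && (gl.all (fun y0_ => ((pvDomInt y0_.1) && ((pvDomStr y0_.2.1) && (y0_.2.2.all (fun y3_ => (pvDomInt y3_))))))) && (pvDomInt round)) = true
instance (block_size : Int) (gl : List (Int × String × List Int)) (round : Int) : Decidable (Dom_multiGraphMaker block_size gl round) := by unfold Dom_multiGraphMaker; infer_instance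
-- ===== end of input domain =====

-- B replaces A's two passes (count table + second pass with an edge_list membership scan) by one
-- counting pass into an insertion-ordered dict keyed by (house, target) and one pass over its items
-- (objective: simpler, same asymptotic cost).

-- module-level constants shared by both Python versions
def houseMapping : PySem.Dict String Int :=
  PySem.Dict.ofList [("Adams", 1), ("Cabot", 2), ("Currier", 3), ("Dunster", 4), ("Eliot", 5),
    ("Kirkland", 6), ("Leverett", 7), ("Lowell", 8), ("Mather", 9), ("Pfoho", 10), ("Quincy", 11),
    ("Winthrop", 12)]

def numMapping : PySem.Dict Int String :=
  PySem.Dict.ofList [(1, "Adams"), (2, "Cabot"), (3, "Currier"), (4, "Dunster"), (5, "Eliot"),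
    (6, "Kirkland"), (7, "Leverett"), (8, "Lowell"), (9, "Mather"), (10, "Pfoho"), (11, "Quincy"),
    (12, "Winthrop")]

-- ===== PORT A =====
def multiGraphMaker (block_size : Int) (gl : List (Int × String × List Int)) (round : Int) : List (List (Int × Int)) :=
  let house_graph : List (List (Int × Int)) := (List.range 12).map (fun _ => [])
  let house_prefs0 : PySem.Dict String (List Int) :=
    PySem.Dict.ofList [("Adams", List.replicate 12 0), ("Cabot", List.replicate 12 0),
      ("Currier", List.replicate 12 0), ("Dunster", List.replicate 12 0),
      ("Eliot", List.replicate 12 0), ("Kirkland", List.replicate 12 0),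
      ("Leverett", List.replicate 12 0), ("Lowell", List.replicate 12 0),
      ("Mather", List.replicate 12 0), ("Pfoho", List.replicate 12 0),
      ("Quincy", List.replicate 12 0), ("Winthrop", List.replicate 12 0)]
  -- first loop: house_prefs[s_house][prefs[round]-1] += 1 (defaults fire only outside Pre_)
  let house_prefs := gl.foldl (fun d x =>
    if x.1 == block_size then
      -- house_prefs[s_house][prefs[round]-1] += 1
      PySem.Dict.modify d x.2.1 (List.replicate 12 0)
        (fun l => PySem.List.pySetD l (PySem.List.pyGetD x.2.2 round 0 - 1)
          (PySem.List.pyGetD l (PySem.List.pyGetD x.2.2 round 0 - 1) 0 + 1))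
    else d) house_prefs0
  -- second loop: edge_list membership scan, skip self-preference, append to house_graph
  let res := gl.foldl (fun (st : List (String × Int) × List (List (Int × Int))) x =>
    if x.1 == block_size then
      let v := PySem.List.pyGetD x.2.2 round 0
      if !st.1.contains (x.2.1, v - 1) && (PySem.Dict.getD numMapping v "" != x.2.1) then
        (st.1 ++ [(x.2.1, v - 1)],
         -- house_graph[house_mapping[s_house]-1].append((prefs[round]-1, house_prefs[s_house][prefs[round]-1]))
         PySem.List.pySetD st.2 (PySem.Dict.getD houseMapping x.2.1 0 - 1)
           (PySem.List.pyGetD st.2 (PySem.Dict.getD houseMapping x.2.1 0 - 1) [] ++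
            [(v - 1, PySem.List.pyGetD (PySem.Dict.getD house_prefs x.2.1 (List.replicate 12 0)) (v - 1) 0)]))
      else st
    else st) (([], house_graph) : List (String × Int) × List (List (Int × Int)))
  res.2

-- ===== PORT B =====
def multiGraphMaker_alt (block_size : Int) (gl : List (Int × String × List Int)) (round : Int) : List (List (Int × Int)) :=
  -- one counting pass: counts[(s_house, prefs[round]-1)] = counts.get(key, 0) + 1
  let counts : PySem.Dict (String × Int) Int := gl.foldl (fun d x =>
    if x.1 == block_size then
      let key : String × Int := (x.2.1, PySem.List.pyGetD x.2.2 round 0 - 1)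
      d.insert key (d.getD key 0 + 1)
    else d) PySem.Dict.empty
  let house_graph : List (List (Int × Int)) := (List.range 12).map (fun _ => [])
  -- one pass over the items (first-appearance order), skipping self-preference edges
  counts.items.foldl (fun g kv =>
    if PySem.Dict.getD numMapping (kv.1.2 + 1) "" != kv.1.1 then
      -- house_graph[house_mapping[s_house]-1].append((target, cnt))
      PySem.List.pySetD g (PySem.Dict.getD houseMapping kv.1.1 0 - 1)
        (PySem.List.pyGetD g (PySem.Dict.getD houseMapping kv.1.1 0 - 1) [] ++ [(kv.1.2, kv.2)])
    else g) house_graph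

-- ===== PRECONDITION & SPEC =====
def houseNames : List String :=
  ["Adams", "Cabot", "Currier", "Dunster", "Eliot", "Kirkland", "Leverett", "Lowell", "Mather",
   "Pfoho", "Quincy", "Winthrop"]

-- Pre_ is exactly where Python A returns: every entry with groupSize == block_size must name one of
-- the 12 houses (else KeyError), round must be a valid Python index into its prefs (else IndexError),
-- and prefs[round] must lie in 1..12 (else KeyError on num_mapping or IndexError on the count row).
def Pre_multiGraphMaker (block_size : Int) (gl : List (Int × String × List Int)) (round : Int) : Prop :=
  ∀ x ∈ gl, x.1 = block_size →
    houseNames.contains x.2.1 = true ∧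
    (PySem.List.pyGet? x.2.2 round).elim false (fun v => 1 ≤ v && v ≤ 12) = true

instance (block_size : Int) (gl : List (Int × String × List Int)) (round : Int) : Decidable (Pre_multiGraphMaker block_size gl round) := by unfold Pre_multiGraphMaker; infer_instance

def pvWitness_multiGraphMaker : Int × (List (Int × String × List Int)) × Int :=
  (2, [(2, "Adams", [3]), (2, "Adams", [3]), (1, "Cabot", []), (2, "Cabot", [2])], 0)

def Spec_multiGraphMaker (block_size : Int) (gl : List (Int × String × List Int)) (round : Int) (out : List (List (Int × Int))) : Prop := out = multiGraphMaker_alt block_size gl round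
instance (block_size : Int) (gl : List (Int × String × List Int)) (round : Int) (out : List (List (Int × Int))) : Decidable (Spec_multiGraphMaker block_size gl round out) := by unfold Spec_multiGraphMaker; infer_instance

-- ===== CLAIM (what is proved, stated in full; the proofs are below) =====
def Claim_equal_multiGraphMaker : Prop := ∀ (block_size : Int) (gl : List (Int × String × List Int)) (round : Int), Dom_multiGraphMaker block_size gl round → Pre_multiGraphMaker block_size gl round → Spec_multiGraphMaker block_size gl round (multiGraphMaker block_size gl round)

-- ===== LEMMAS AND PROOFS =====

-- proof-side names for the two in-place updates both ports write inline
def incrAt (l : List Int) (i : Int) : List Int :=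
  PySem.List.pySetD l i (PySem.List.pyGetD l i 0 + 1)

def appendAt (g : List (List (Int × Int))) (i : Int) (e : Int × Int) : List (List (Int × Int)) :=
  PySem.List.pySetD g i (PySem.List.pyGetD g i [] ++ [e])

-- the pair (s_house, prefs[round]-1) an entry contributes
def pairOf (round : Int) (x : Int × String × List Int) : String × Int :=
  (x.2.1, PySem.List.pyGetD x.2.2 round 0 - 1)

-- A's count-table step, over the pair list
def stepT (d : PySem.Dict String (List Int)) (q : String × Int) : PySem.Dict String (List Int) :=
  PySem.Dict.modify d q.1 (List.replicate 12 0) (fun l => incrAt l q.2)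

def nonself (q : String × Int) : Bool :=
  PySem.Dict.getD numMapping (q.2 + 1) "" != q.1

def emit (c : String × Int → Int) (g : List (List (Int × Int))) (q : String × Int) :
    List (List (Int × Int)) :=
  appendAt g (PySem.Dict.getD houseMapping q.1 0 - 1) (q.2, c q)

-- the first occurrences of P that are not already in the seen list s
def newOf : List (String × Int) → List (String × Int) → List (String × Int)
  | [], _ => []
  | q :: P, s => if s.contains q then newOf P s else q :: newOf P (s ++ [q])

theorem foldl_add_eq_newOf (P : List (String × Int)) (s : List (String × Int)) :
    P.foldl PySem.Set.add s = s ++ newOf P s := by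
  induction P generalizing s with
  | nil => simp [newOf]
  | cons q P ih =>
    simp only [List.foldl_cons, newOf]
    by_cases h : q ∈ s
    · have hc : s.contains q = true := by simpa using h
      simp [PySem.Set.add, PySem.Set.contains, h, ih]
    · have hc : s.contains q = false := by simpa using h
      simp [PySem.Set.add, PySem.Set.contains, h, ih (s ++ [q])]

theorem ofList_eq_newOf (P : List (String × Int)) : PySem.Set.ofList P = newOf P [] := by
  rw [PySem.Set.ofList_eq_foldl, foldl_add_eq_newOf]; simp

-- A's initial count table, named for the proofs (identical to the literal in the port)
def hp0A : PySem.Dict String (List Int) :=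
  PySem.Dict.ofList [("Adams", List.replicate 12 0), ("Cabot", List.replicate 12 0),
    ("Currier", List.replicate 12 0), ("Dunster", List.replicate 12 0),
    ("Eliot", List.replicate 12 0), ("Kirkland", List.replicate 12 0),
    ("Leverett", List.replicate 12 0), ("Lowell", List.replicate 12 0),
    ("Mather", List.replicate 12 0), ("Pfoho", List.replicate 12 0),
    ("Quincy", List.replicate 12 0), ("Winthrop", List.replicate 12 0)]

-- every row of A's initial table (or its default) is twelve zeros
theorem housePrefs0_getD (h : String) :
    hp0A.getD h (List.replicate 12 0) = List.replicate 12 0 := by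
  cases hg : hp0A.get? h with
  | none => simp only [PySem.Dict.getD_eq_get?_getD, hg, Option.getD_none]
  | some v =>
    have hmm := PySem.Dict.mem_items_of_get?_eq_some (d := hp0A) hg
    have hitems : hp0A.items = [("Adams", List.replicate 12 (0:Int)), ("Cabot", List.replicate 12 0),
      ("Currier", List.replicate 12 0), ("Dunster", List.replicate 12 0),
      ("Eliot", List.replicate 12 0), ("Kirkland", List.replicate 12 0),
      ("Leverett", List.replicate 12 0), ("Lowell", List.replicate 12 0),
      ("Mather", List.replicate 12 0), ("Pfoho", List.replicate 12 0),
      ("Quincy", List.replicate 12 0), ("Winthrop", List.replicate 12 0)] := by decide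
    rw [hitems] at hmm
    simp only [List.mem_cons, List.not_mem_nil, or_false, Prod.mk.injEq] at hmm
    simp only [PySem.Dict.getD_eq_get?_getD, hg, Option.getD_some]
    rcases hmm with ⟨_, rfl⟩ | ⟨_, rfl⟩ | ⟨_, rfl⟩ | ⟨_, rfl⟩ | ⟨_, rfl⟩ | ⟨_, rfl⟩ | ⟨_, rfl⟩ |
      ⟨_, rfl⟩ | ⟨_, rfl⟩ | ⟨_, rfl⟩ | ⟨_, rfl⟩ | ⟨_, rfl⟩ <;> rfl

-- reading a cell after a single increment
theorem pyGetD_incrAt (l : List Int) (t t' : Int) (hlen : l.length = 12)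
    (ht : 0 ≤ t ∧ t < 12) (ht' : 0 ≤ t' ∧ t' < 12) :
    PySem.List.pyGetD (incrAt l t') t 0
      = PySem.List.pyGetD l t 0 + (if t' = t then 1 else 0) := by
  unfold incrAt
  rw [PySem.List.pySetD_of_nonneg _ _ ht'.1]
  rw [PySem.List.pyGetD_eq_getElem _ _ ht.1 (by simp [hlen]; omega),
      PySem.List.pyGetD_eq_getElem _ _ ht.1 (by omega)]
  rw [List.getElem_set]
  by_cases h : t' = t
  · subst h
    rw [if_pos rfl, PySem.List.pyGetD_eq_getElem _ _ ht.1 (by omega)]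
    simp
  · have hne : t'.toNat ≠ t.toNat := by omega
    simp [hne, h]

theorem length_incrAt (l : List Int) (i : Int) : (incrAt l i).length = l.length := by
  simp [incrAt, PySem.List.length_pySetD]

-- the count table computes the multiplicity of each pair
theorem table_count (P : List (String × Int)) (d : PySem.Dict String (List Int))
    (h : String) (t : Int) (ht : 0 ≤ t ∧ t < 12)
    (hP : ∀ q ∈ P, 0 ≤ q.2 ∧ q.2 < 12)
    (hd : ∀ h', (d.getD h' (List.replicate 12 0)).length = 12) :
    PySem.List.pyGetD ((P.foldl stepT d).getD h (List.replicate 12 0)) t 0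
      = PySem.List.pyGetD (d.getD h (List.replicate 12 0)) t 0 + (P.count (h, t) : Int) := by
  induction P generalizing d with
  | nil => simp
  | cons q P ih =>
    simp only [List.foldl_cons]
    rw [ih (stepT d q) (fun q' hq' => hP q' (List.mem_cons_of_mem _ hq'))
      (fun h' => by
        simp only [stepT, PySem.Dict.getD_modify]
        split_ifs with hh
        · rw [length_incrAt]; exact hd _
        · exact hd _)]
    have hq := hP q (List.mem_cons_self ..)
    simp only [stepT, PySem.Dict.getD_modify]
    by_cases hh : h = q.1
    · subst hh
      rw [if_pos rfl, pyGetD_incrAt _ _ _ (hd _) ht hq]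
      by_cases he : q.2 = t
      · have hQ : q = (q.1, t) := by rw [← he]
        rw [hQ]
        simp
        push_cast
        ring
      · have hQ : q ≠ (q.1, t) := by
          intro hc; exact he (congrArg Prod.snd hc)
        simp [List.count_cons, he]
        exact hQ
    · rw [if_neg hh]
      have hne : q ≠ ((h, t) : String × Int) := fun hc => hh ((congrArg Prod.fst hc).symm)
      simp [List.count_cons, hne]

-- main loop correspondence: A's seen-list pass equals the pass over first occurrences
theorem loop_eq (P : List (String × Int)) (el el' : List (String × Int))
    (g : List (List (Int × Int))) (c₁ c₂ : String × Int → Int)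
    (hagree : ∀ q, nonself q = true → (q ∈ el ↔ q ∈ el'))
    (hel : ∀ q ∈ el, nonself q = true)
    (hc : ∀ q ∈ P, c₁ q = c₂ q) :
    (P.foldl (fun st q =>
        if !st.1.contains q && nonself q then (st.1 ++ [q], emit c₁ st.2 q) else st) (el, g)).2
      = (newOf P el').foldl (fun g q => if nonself q then emit c₂ g q else g) g := by
  induction P generalizing el el' g with
  | nil => simp [newOf]
  | cons q P ih =>
    simp only [List.foldl_cons, newOf]
    by_cases hns : nonself q = true
    · by_cases hmem : q ∈ el
      · have hmem' : q ∈ el' := (hagree q hns).mp hmem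
        rw [if_neg (by simp [hmem, hns]), if_pos (by simp [hmem'])]
        exact ih el el' g hagree hel (fun q' hq' => hc q' (List.mem_cons_of_mem _ hq'))
      · have hmem' : q ∉ el' := fun hc' => hmem ((hagree q hns).mpr hc')
        rw [if_pos (by simp [hmem, hns]), if_neg (by simp [hmem'])]
        simp only [List.foldl_cons, if_pos hns]
        have hce : emit c₁ g q = emit c₂ g q := by
          simp [emit, hc q (List.mem_cons_self ..)]
        rw [hce]
        exact ih (el ++ [q]) (el' ++ [q]) _
          (fun q' hq' => by
            simp only [List.mem_append, List.mem_singleton]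
            exact or_congr_left (hagree q' hq'))
          (fun q' hq' => by
            rcases List.mem_append.mp hq' with h' | h'
            · exact hel q' h'
            · rw [List.mem_singleton.mp h']; exact hns)
          (fun q' hq' => hc q' (List.mem_cons_of_mem _ hq'))
    · rw [if_neg (by simp [hns])]
      by_cases hmem' : q ∈ el'
      · rw [if_pos (by simp [hmem'])]
        exact ih el el' g hagree hel (fun q' hq' => hc q' (List.mem_cons_of_mem _ hq'))
      · rw [if_neg (by simp [hmem'])]
        simp only [List.foldl_cons, if_neg hns]
        exact ih el (el' ++ [q]) g
          (fun q' hq' => by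
            simp only [List.mem_append, List.mem_singleton]
            constructor
            · intro h'; exact Or.inl ((hagree q' hq').mp h')
            · rintro (h' | rfl)
              · exact (hagree q' hq').mpr h'
              · exact absurd hq' (by simp [hns]))
          hel (fun q' hq' => hc q' (List.mem_cons_of_mem _ hq'))


def pairsOf (bs : Int) (gl : List (Int × String × List Int)) (round : Int) : List (String × Int) :=
  (gl.filter (fun x => x.1 == bs)).map (pairOf round)

def graph0 : List (List (Int × Int)) := (List.range 12).map (fun _ => [])

def cnt2 (P : List (String × Int)) (q : String × Int) : Int := (P.count q : Int)

theorem pairs_range (bs : Int) (gl : List (Int × String × List Int)) (round : Int)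
    (hpre : Pre_multiGraphMaker bs gl round) :
    ∀ q ∈ pairsOf bs gl round, 0 ≤ q.2 ∧ q.2 < 12 := by
  intro q hq
  rcases List.mem_map.mp hq with ⟨x, hx, rfl⟩
  rcases List.mem_filter.mp hx with ⟨hxg, hxb⟩
  have h2 := (hpre x hxg (by simpa using hxb)).2
  cases hv : PySem.List.pyGet? x.2.2 round with
  | none => rw [hv] at h2; simp at h2
  | some v =>
    rw [hv] at h2
    simp only [Option.elim_some, Bool.and_eq_true, decide_eq_true_eq] at h2
    simp only [pairOf, PySem.List.pyGetD, hv, Option.getD_some]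
    omega

theorem B_eq (bs : Int) (gl : List (Int × String × List Int)) (round : Int) :
    multiGraphMaker_alt bs gl round
      = (PySem.Set.ofList (pairsOf bs gl round)).foldl
          (fun g q => if nonself q then emit (cnt2 (pairsOf bs gl round)) g q else g) graph0 := by
  unfold multiGraphMaker_alt
  have h1 : (gl.foldl (fun d x =>
      if x.1 == bs then
        d.insert (x.2.1, PySem.List.pyGetD x.2.2 round 0 - 1)
          (d.getD (x.2.1, PySem.List.pyGetD x.2.2 round 0 - 1) 0 + 1)
      else d) PySem.Dict.empty) = PySem.Dict.counter (pairsOf bs gl round) := by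
    rw [PySem.List.foldl_if_eq_foldl_filter]
    rw [← PySem.Dict.foldl_insert_getD_add_one_eq_counter]
    unfold pairsOf
    rw [List.foldl_map]
    exact PySem.List.foldl_congr_mem' _ _ _ _ (fun x _ acc => by simp only [pairOf])
  simp only [h1, PySem.Dict.items_counter]
  rw [List.foldl_map]
  exact PySem.List.foldl_congr_mem' _ _ _ _ (fun q _ acc => by simp only [nonself, emit, cnt2, appendAt])

theorem pass2_eq (bs : Int) (gl : List (Int × String × List Int)) (round : Int)
    (c : String × Int → Int) (el0 : List (String × Int)) (g0 : List (List (Int × Int))) :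
    (gl.foldl (fun (st : List (String × Int) × List (List (Int × Int))) x =>
      if x.1 == bs then
        if !st.1.contains (x.2.1, PySem.List.pyGetD x.2.2 round 0 - 1) &&
            (PySem.Dict.getD numMapping (PySem.List.pyGetD x.2.2 round 0) "" != x.2.1) then
          (st.1 ++ [(x.2.1, PySem.List.pyGetD x.2.2 round 0 - 1)],
           PySem.List.pySetD st.2 (PySem.Dict.getD houseMapping x.2.1 0 - 1)
             (PySem.List.pyGetD st.2 (PySem.Dict.getD houseMapping x.2.1 0 - 1) [] ++
              [(PySem.List.pyGetD x.2.2 round 0 - 1,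
                c (x.2.1, PySem.List.pyGetD x.2.2 round 0 - 1))]))
        else st
      else st) (el0, g0))
    = (pairsOf bs gl round).foldl (fun st q =>
        if !st.1.contains q && nonself q then (st.1 ++ [q], emit c st.2 q) else st) (el0, g0) := by
  rw [PySem.List.foldl_if_eq_foldl_filter]
  unfold pairsOf
  rw [List.foldl_map]
  exact PySem.List.foldl_congr_mem' _ _ _ _
    (fun x _ acc => by simp only [pairOf, nonself, emit, appendAt, sub_add_cancel])

theorem A_eq (bs : Int) (gl : List (Int × String × List Int)) (round : Int)
    (hpre : Pre_multiGraphMaker bs gl round) :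
    multiGraphMaker bs gl round
      = (newOf (pairsOf bs gl round) []).foldl
          (fun g q => if nonself q then emit (cnt2 (pairsOf bs gl round)) g q else g) graph0 := by
  unfold multiGraphMaker
  rw [show (PySem.Dict.ofList [("Adams", List.replicate 12 0), ("Cabot", List.replicate 12 0),
      ("Currier", List.replicate 12 0), ("Dunster", List.replicate 12 0),
      ("Eliot", List.replicate 12 0), ("Kirkland", List.replicate 12 0),
      ("Leverett", List.replicate 12 0), ("Lowell", List.replicate 12 0),
      ("Mather", List.replicate 12 0), ("Pfoho", List.replicate 12 0),
      ("Quincy", List.replicate 12 0), ("Winthrop", List.replicate 12 0)] :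
      PySem.Dict String (List Int)) = hp0A from rfl]
  have hrange := pairs_range bs gl round hpre
  -- pass 1 equals the count-table fold over the pair list
  have h1 : (gl.foldl (fun d x =>
      if x.1 == bs then
        PySem.Dict.modify d x.2.1 (List.replicate 12 0)
          (fun l => PySem.List.pySetD l (PySem.List.pyGetD x.2.2 round 0 - 1)
            (PySem.List.pyGetD l (PySem.List.pyGetD x.2.2 round 0 - 1) 0 + 1))
      else d) (hp0A))
      = (pairsOf bs gl round).foldl stepT (hp0A) := by
    rw [PySem.List.foldl_if_eq_foldl_filter]
    unfold pairsOf
    rw [List.foldl_map]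
    exact PySem.List.foldl_congr_mem' _ _ _ _ (fun x _ acc => by simp only [stepT, pairOf, incrAt])
  simp only [h1]
  -- the count function A looks up equals the multiplicity in the pair list
  have hc : ∀ q ∈ pairsOf bs gl round,
      PySem.List.pyGetD
        (((pairsOf bs gl round).foldl stepT (hp0A)).getD q.1
          (List.replicate 12 0)) q.2 0 = cnt2 (pairsOf bs gl round) q := by
    intro q hq
    rw [table_count _ _ q.1 q.2 (hrange q hq) hrange
      (fun h' => by rw [housePrefs0_getD]; simp)]
    rw [housePrefs0_getD]
    have ht := hrange q hq
    rw [PySem.List.pyGetD_eq_getElem _ _ ht.1 (by simp; omega)]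
    simp only [List.getElem_replicate, zero_add, cnt2, Prod.mk.eta]
  -- pass 2 equals the seen-list fold over the pair list
  simp only [graph0]
  rw [pass2_eq bs gl round
    (fun q => PySem.List.pyGetD
      (((pairsOf bs gl round).foldl stepT hp0A).getD q.1 (List.replicate 12 0)) q.2 0)
    [] ((List.range 12).map (fun _ => []))]
  rw [loop_eq _ [] [] _ _ _ (fun q _ => Iff.rfl) (fun q hq => absurd hq (List.not_mem_nil))
    hc]

-- ===== VERDICT (by name: the statement is the Claim_ definition above) =====
theorem multiGraphMaker_spec : Claim_equal_multiGraphMaker := by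
  intro bs gl round _ hpre
  unfold Spec_multiGraphMaker
  rw [A_eq bs gl round hpre, B_eq bs gl round, ofList_eq_newOf]
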